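-- pv_equiv track=rewrite | github.com/YormanRodriguez/Modelo-predictivo | backend/parametros_bridge.py | validate_model_parameters
-- ===== SOURCE A (Python) =====
-- def validate_model_parameters(order, seasonal_order):
--     """Validar que los parámetros del modelo sean válidos"""
--     try:
--         # Validar order (p, d, q)
--         if not (isinstance(order, tuple) and len(order) == 3):
--             return False
--         p, d, q = order
--         if not all(isinstance(x, int) and 0 <= x <= 10 for x in [p, q]):
--             return False
--         if not (isinstance(d, int) and 0 <= d <= 2):
--             return False
--
--         # Validar seasonal_order (P, D, Q, s)
--         if not (isinstance(seasonal_order, tuple) and len(seasonal_order) == 4):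
--             return False
--         P, D, Q, s = seasonal_order
--         if not all(isinstance(x, int) and 0 <= x <= 5 for x in [P, Q]):
--             return False
--         if not (isinstance(D, int) and 0 <= D <= 2):
--             return False
--         if not (isinstance(s, int) and 1 <= s <= 24):
--             return False
--
--         return True
--
--     except Exception:
--         return False
-- ===== SOURCE B (Python) =====
-- def validate_model_parameters(order, seasonal_order):
--     """Validar que los parametros del modelo sean validos.
--
--     Recursive decomposition: unpack both tuples (length errors are caught by
--     the try/except), flatten the seven values next to parallel lower/upper
--     bound sequences, and recurse over them; each value is valid iff it is an
--     int and clamping it into [lo, hi] leaves it unchanged.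
--     """
--     def check(vals, lows, highs):
--         if not vals:
--             return True
--         v, lo, hi = vals[0], lows[0], highs[0]
--         if not (isinstance(v, int) and max(lo, min(v, hi)) == v):
--             return False
--         return check(vals[1:], lows[1:], highs[1:])
--
--     try:
--         if not (isinstance(order, tuple) and isinstance(seasonal_order, tuple)):
--             return False
--         p, d, q = order
--         P, D, Q, s = seasonal_order
--         return check((p, q, d, P, Q, D, s),
--                      (0, 0, 0, 0, 0, 0, 1),
--                      (10, 10, 2, 5, 5, 2, 24))
--     except Exception:
--         return False
-- ===== Notes on version B (the rewrite author's own statement) =====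
-- stated objective: alternative
-- what changed: Replaces A's seven sequential two-sided guard branches with a recursive walk over the flattened values and parallel lower/upper bound lists, testing each value by clamping (max(lo, min(v, hi)) == v) instead of chained comparisons.
import Mathlib
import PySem

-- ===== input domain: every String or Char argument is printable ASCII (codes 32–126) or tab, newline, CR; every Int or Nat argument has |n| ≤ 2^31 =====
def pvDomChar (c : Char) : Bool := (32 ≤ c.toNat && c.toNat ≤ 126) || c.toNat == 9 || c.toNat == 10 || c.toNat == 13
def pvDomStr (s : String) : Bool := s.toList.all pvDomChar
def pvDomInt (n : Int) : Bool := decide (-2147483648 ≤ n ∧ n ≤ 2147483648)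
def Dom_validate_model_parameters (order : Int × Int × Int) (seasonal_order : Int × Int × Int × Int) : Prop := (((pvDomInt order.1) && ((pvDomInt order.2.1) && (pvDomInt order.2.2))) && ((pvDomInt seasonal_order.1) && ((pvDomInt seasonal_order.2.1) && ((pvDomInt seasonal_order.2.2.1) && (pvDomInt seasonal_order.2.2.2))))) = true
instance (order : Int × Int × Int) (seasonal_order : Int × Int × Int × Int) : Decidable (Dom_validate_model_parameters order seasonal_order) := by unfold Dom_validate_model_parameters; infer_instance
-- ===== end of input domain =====

-- B replaces A's seven sequential guard branches by a recursive walk over the values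
-- paired with parallel bound lists, testing each value by clamping (objective: alternative decomposition).

-- ===== PORT A =====
-- Transliteration of A: sequential guard branches; the tuple/len isinstance checks hold by type here.
def validate_model_parameters (order : Int × Int × Int) (seasonal_order : Int × Int × Int × Int) : Bool :=
  let p := order.1; let d := order.2.1; let q := order.2.2
  if !([p, q].all fun x => decide (0 ≤ x) && decide (x ≤ 10)) then false
  else if !(decide (0 ≤ d) && decide (d ≤ 2)) then false
  else
    let P := seasonal_order.1; let D := seasonal_order.2.1
    let Q := seasonal_order.2.2.1; let s := seasonal_order.2.2.2
    if !([P, Q].all fun x => decide (0 ≤ x) && decide (x ≤ 5)) then false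
    else if !(decide (0 ≤ D) && decide (D ≤ 2)) then false
    else if !(decide (1 ≤ s) && decide (s ≤ 24)) then false
    else true

-- ===== PORT B =====
-- B's recursive helper `check`: empty values → True; otherwise clamp-test the head and recurse
-- on the tails. (In Source B, running out of bounds while values remain would raise; here, as there,
-- the literal call sites keep the three lists equally long, and that arm returns true — unreachable.)
def pvCheck : List Int → List Int → List Int → Bool
  | [], _, _ => true
  | v :: vs, lo :: los, hi :: his =>
      if !(decide (max lo (min v hi) = v)) then false else pvCheck vs los his
  | _ :: _, _, _ => true

-- Transliteration of B: unpack both tuples, then recurse over values and parallel bound lists.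
def validate_model_parameters_alt (order : Int × Int × Int) (seasonal_order : Int × Int × Int × Int) : Bool :=
  let p := order.1; let d := order.2.1; let q := order.2.2
  let P := seasonal_order.1; let D := seasonal_order.2.1
  let Q := seasonal_order.2.2.1; let s := seasonal_order.2.2.2
  pvCheck [p, q, d, P, Q, D, s] [0, 0, 0, 0, 0, 0, 1] [10, 10, 2, 5, 5, 2, 24]

-- ===== PRECONDITION & SPEC =====
def Spec_validate_model_parameters (order : Int × Int × Int) (seasonal_order : Int × Int × Int × Int) (out : Bool) : Prop := out = validate_model_parameters_alt order seasonal_order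
instance (order : Int × Int × Int) (seasonal_order : Int × Int × Int × Int) (out : Bool) : Decidable (Spec_validate_model_parameters order seasonal_order out) := by unfold Spec_validate_model_parameters; infer_instance

-- ===== CLAIM (what is proved, stated in full; the proofs are below) =====
def Claim_equal_validate_model_parameters : Prop := ∀ (order : Int × Int × Int) (seasonal_order : Int × Int × Int × Int), Dom_validate_model_parameters order seasonal_order → Spec_validate_model_parameters order seasonal_order (validate_model_parameters order seasonal_order)

-- ===== LEMMAS AND PROOFS =====
-- 'if not (test): return False else continue' as a Boolean conjunction
theorem pv_guard_and (b x : Bool) : (if (!b) = true then false else x) = (b && x) := by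
  cases b <;> simp

-- the clamp test of B equals the two-sided comparison of A (for lo ≤ hi)
theorem pv_clamp_eq (v : Int) (lo hi : Int) (h : lo ≤ hi) :
    (decide (max lo (min v hi) = v)) = (decide (lo ≤ v) && decide (v ≤ hi)) := by
  rw [Bool.eq_iff_iff]; simp; omega

-- ===== VERDICT (by name: the statement is the Claim_ definition above) =====
theorem validate_model_parameters_spec : Claim_equal_validate_model_parameters := by
  intro order seasonal_order _
  simp only [Spec_validate_model_parameters, validate_model_parameters,
    validate_model_parameters_alt, pvCheck, List.all_cons, List.all_nil,
    pv_guard_and, pv_clamp_eq _ 0 10 (by decide), pv_clamp_eq _ 0 2 (by decide),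
    pv_clamp_eq _ 0 5 (by decide), pv_clamp_eq _ 1 24 (by decide),
    Bool.and_true, Bool.and_assoc]
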